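-- pv_equiv track=rewrite | github.com/fern35/Spark | velib.py | checkchange
-- ===== SOURCE A (Python) =====
-- def checkchange(infos,currentinfo):
-- #if the no of available bikes changes during the last 5s, ifchang=1
-- #else ifchange=0
-- #return the latest value and add the information of 'ifchange'
--     if not len(infos)==0:
--         ifchange=0
--         available_bikes=0
--         #pick the values of'last_update' in the infos and regroup into a new list
--         updatelst=[i[0] for i in infos]
--         #pick the values of'available_bikes' in the infos and regroup into a new list
--         availst=[i[1] for i in infos]
--         #the latest value of 'available_bikes'
--         latest_avai=availst[updatelst.index(max(updatelst))]
--         if not(currentinfo is None):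
--             if (not len(set(availst))==1) or (latest_avai!=currentinfo[1]):
--                 ifchange=1
--             else:
--                 ifchange=0
--         return (max(updatelst),latest_avai,ifchange)
--     else:
--         return (currentinfo[0],currentinfo[1],0)
-- ===== SOURCE B (Python) =====
-- def checkchange(infos, currentinfo):
--     # One fused loop instead of three list-building/max/index/set passes.
--     if not infos:
--         return (currentinfo[0], currentinfo[1], 0)
--     u0, a0 = infos[0]
--     max_u, best_a, all_eq = u0, a0, True
--     for u, a in infos[1:]:
--         if u > max_u:
--             max_u, best_a = u, a
--         if a != a0:
--             all_eq = False
--     if currentinfo is None: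
--         ifchange = 0
--     else:
--         ifchange = 1 if (not all_eq) or (best_a != currentinfo[1]) else 0
--     return (max_u, best_a, ifchange)
-- ===== Notes on version B (the rewrite author's own statement) =====
-- stated objective: alternative
-- what changed: Replaced A's multiple passes (two list comprehensions, max, list.index, set construction) with a single fused loop maintaining the running maximum update time, its avail value, and an all-equal flag.
import Mathlib
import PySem

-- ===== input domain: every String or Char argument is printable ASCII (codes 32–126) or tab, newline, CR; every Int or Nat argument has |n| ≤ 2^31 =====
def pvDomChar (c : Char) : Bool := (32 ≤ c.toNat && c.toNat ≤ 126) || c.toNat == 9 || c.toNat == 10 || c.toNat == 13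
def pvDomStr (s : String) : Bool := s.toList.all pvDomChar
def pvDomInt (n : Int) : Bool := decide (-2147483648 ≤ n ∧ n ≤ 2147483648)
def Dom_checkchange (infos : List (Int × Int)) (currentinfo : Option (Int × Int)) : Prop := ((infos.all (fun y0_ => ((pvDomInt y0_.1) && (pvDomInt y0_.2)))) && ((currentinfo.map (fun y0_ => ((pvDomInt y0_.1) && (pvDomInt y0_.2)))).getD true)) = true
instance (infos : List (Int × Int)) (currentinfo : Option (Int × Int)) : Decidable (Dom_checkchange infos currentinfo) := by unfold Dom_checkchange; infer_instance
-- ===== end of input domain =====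

-- B replaces A's multiple passes (comprehensions, max, list.index, set) with one fused loop; same results.

-- ===== PORT A =====
def checkchange (infos : List (Int × Int)) (currentinfo : Option (Int × Int)) : Int × Int × Int :=
  if infos.length ≠ 0 then
    let updatelst := infos.map (fun i => i.1)
    let availst := infos.map (fun i => i.2)
    -- max(updatelst): infos nonempty so max? is some; getD 0 is unreachable padding
    let maxupd := (PySem.List.max? updatelst (fun y => y)).getD 0
    -- availst[updatelst.index(max(updatelst))]
    let latest_avai := ((PySem.List.index? updatelst maxupd).bind
        (fun i => PySem.List.pyGet? availst (Int.ofNat i))).getD 0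
    let ifchange : Int :=
      match currentinfo with
      | none => 0
      | some c =>
        if ¬ (PySem.Set.ofList availst).length = 1 ∨ latest_avai ≠ c.2 then 1 else 0
    (maxupd, latest_avai, ifchange)
  else
    match currentinfo with
    | none => (0, 0, 0)   -- Python raises TypeError here (currentinfo[0] on None); excluded by Pre_
    | some c => (c.1, c.2, 0)

-- ===== PORT B =====
def checkchange_alt (infos : List (Int × Int)) (currentinfo : Option (Int × Int)) : Int × Int × Int :=
  match infos with
  | [] =>
    match currentinfo with
    | none => (0, 0, 0)   -- Python raises TypeError here; excluded by Pre_
    | some c => (c.1, c.2, 0)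
  | (u0, a0) :: rest =>
    let st := rest.foldl (fun (s : Int × Int × Bool) (p : Int × Int) =>
        ((if p.1 > s.1 then p.1 else s.1),
         (if p.1 > s.1 then p.2 else s.2.1),
         (s.2.2 && (p.2 == a0)))) (u0, a0, true)
    let ifchange : Int :=
      match currentinfo with
      | none => 0
      | some c => if st.2.2 = false ∨ st.2.1 ≠ c.2 then 1 else 0
    (st.1, st.2.1, ifchange)

-- ===== PRECONDITION & SPEC =====
-- Pre_ excludes only (infos = [], currentinfo = None), where both A and B raise TypeError.
def Pre_checkchange (infos : List (Int × Int)) (currentinfo : Option (Int × Int)) : Prop :=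
  infos ≠ [] ∨ currentinfo ≠ none
instance (infos : List (Int × Int)) (currentinfo : Option (Int × Int)) : Decidable (Pre_checkchange infos currentinfo) := by unfold Pre_checkchange; infer_instance

def pvWitness_checkchange : (List (Int × Int)) × (Option (Int × Int)) := ([(1, 2), (3, 4)], some (0, 2))

def Spec_checkchange (infos : List (Int × Int)) (currentinfo : Option (Int × Int)) (out : Int × Int × Int) : Prop := out = checkchange_alt infos currentinfo
instance (infos : List (Int × Int)) (currentinfo : Option (Int × Int)) (out : Int × Int × Int) : Decidable (Spec_checkchange infos currentinfo out) := by unfold Spec_checkchange; infer_instance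

-- ===== CLAIM (what is proved, stated in full; the proofs are below) =====
def Claim_equal_checkchange : Prop := ∀ (infos : List (Int × Int)) (currentinfo : Option (Int × Int)), Dom_checkchange infos currentinfo → Pre_checkchange infos currentinfo → Spec_checkchange infos currentinfo (checkchange infos currentinfo)

-- ===== LEMMAS AND PROOFS =====

-- state of B's loop on (u,a): running max and its first-occurrence avail
def firstMax (u a : Int) : List (Int × Int) → Int × Int
  | [] => (u, a)
  | p :: t => if p.1 > u then firstMax p.1 p.2 t else firstMax u a t

theorem foldB_eq (a0 : Int) : ∀ (t : List (Int × Int)) (u a : Int) (b : Bool),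
    t.foldl (fun (s : Int × Int × Bool) (p : Int × Int) =>
        ((if p.1 > s.1 then p.1 else s.1),
         (if p.1 > s.1 then p.2 else s.2.1),
         (s.2.2 && (p.2 == a0)))) (u, a, b)
    = ((firstMax u a t).1, (firstMax u a t).2, b && t.all (fun p => p.2 == a0)) := by
  intro t
  induction t with
  | nil => intro u a b; simp [firstMax]
  | cons p t ih =>
    intro u a b
    simp only [List.foldl_cons, List.all_cons, firstMax]
    by_cases h : p.1 > u
    · simp [h, ih, Bool.and_assoc]
    · simp [h, ih, Bool.and_assoc]

theorem fm_fst : ∀ (t : List (Int × Int)) (u a : Int),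
    (firstMax u a t).1 = (t.map (fun i => i.1)).foldl max u := by
  intro t
  induction t with
  | nil => intro u a; simp [firstMax]
  | cons p t ih =>
    intro u a
    simp only [firstMax, List.map_cons, List.foldl_cons]
    by_cases h : p.1 > u
    · rw [if_pos h, ih, max_eq_right (le_of_lt h)]
    · rw [if_neg h, ih, max_eq_left (by omega)]

theorem key_idx : ∀ (t : List (Int × Int)) (u a : Int), ∃ i : Nat,
    PySem.List.index? (u :: t.map (fun p => p.1)) (firstMax u a t).1 = some i ∧
    (a :: t.map (fun p => p.2))[i]? = some (firstMax u a t).2 := by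
  intro t
  induction t with
  | nil =>
    intro u a
    exact ⟨0, by simp [firstMax]⟩
  | cons p t ih =>
    intro u a
    by_cases h : p.1 > u
    · obtain ⟨i, hidx, hget⟩ := ih p.1 p.2
      refine ⟨i + 1, ?_, ?_⟩
      · have hm : (firstMax u a (p :: t)).1 = (firstMax p.1 p.2 t).1 := by
          simp [firstMax, h]
        have hub : p.1 ≤ (firstMax p.1 p.2 t).1 := by
          rw [fm_fst]; exact (PySem.List.le_foldl_max _ _).1
        have hne : u ≠ (firstMax p.1 p.2 t).1 := by omega
        rw [hm]
        simp only [List.map_cons]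
        rw [PySem.List.index?_cons_of_ne _ hne, hidx]
        rfl
      · have hm : firstMax u a (p :: t) = firstMax p.1 p.2 t := by
          simp [firstMax, h]
        rw [hm]
        simpa using hget
    · obtain ⟨i, hidx, hget⟩ := ih u a
      have hm : firstMax u a (p :: t) = firstMax u a t := by
        simp [firstMax, h]
      have hub : u ≤ (firstMax u a t).1 := by
        rw [fm_fst]; exact (PySem.List.le_foldl_max _ _).1
      by_cases he : u = (firstMax u a t).1
      · have hi0 : i = 0 := by
          rw [← he, PySem.List.index?_cons_self] at hidx
          exact (Option.some_inj.mp hidx).symm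
        subst hi0
        refine ⟨0, ?_, ?_⟩
        · rw [hm, ← he, PySem.List.index?_cons_self]
        · rw [hm]; simpa using hget
      · have hlt : u < (firstMax u a t).1 := lt_of_le_of_ne hub he
        have hpne : p.1 ≠ (firstMax u a t).1 := by omega
        rw [PySem.List.index?_cons_of_ne _ he] at hidx
        obtain ⟨j, hj, hij⟩ := Option.map_eq_some_iff.mp hidx
        refine ⟨j + 2, ?_, ?_⟩
        · rw [hm]
          simp only [List.map_cons]
          rw [PySem.List.index?_cons_of_ne _ he, PySem.List.index?_cons_of_ne _ hpne, hj]
          simp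
        · have : i = j + 1 := hij.symm
          subst this
          rw [hm]
          simpa using hget

-- set-build length lemmas
theorem len_le_foldl_add : ∀ (l s : List Int), s.length ≤ (l.foldl PySem.Set.add s).length := by
  intro l
  induction l with
  | nil => intro s; simp
  | cons x l ih =>
    intro s
    have h2 : s.length ≤ (PySem.Set.add s x).length := by
      simp only [PySem.Set.add]
      split <;> simp
    exact le_trans h2 (ih _)

theorem setlen_one_iff : ∀ (l : List Int) (a : Int),
    ((l.foldl PySem.Set.add [a]).length = 1) ↔ (l.all (fun x => x == a) = true) := by
  intro l
  induction l with
  | nil => intro a; simp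
  | cons x l ih =>
    intro a
    simp only [List.foldl_cons, List.all_cons, Bool.and_eq_true]
    by_cases h : x = a
    · subst h
      have : PySem.Set.add [x] x = [x] := by simp [PySem.Set.add, PySem.Set.contains]
      rw [this]
      simp [ih]
    · have : PySem.Set.add [a] x = [a, x] := by
        simp [PySem.Set.add, PySem.Set.contains, h]
      rw [this]
      constructor
      · intro hl
        have := len_le_foldl_add l [a, x]
        simp at this; omega
      · rintro ⟨h1, -⟩
        simp at h1; exact absurd h1 h

theorem ofList_cons_len (a : Int) (l : List Int) :
    (PySem.Set.ofList (a :: l)).length = (l.foldl PySem.Set.add [a]).length := by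
  rw [PySem.Set.ofList_eq_foldl]
  simp [List.foldl_cons, PySem.Set.add, PySem.Set.contains]

-- ===== VERDICT (by name: the statement is the Claim_ definition above) =====
theorem checkchange_spec : Claim_equal_checkchange := by
  intro infos currentinfo _hdom hpre
  unfold Spec_checkchange
  cases infos with
  | nil =>
    cases currentinfo with
    | none => exact absurd rfl (hpre.resolve_left (by simp))
    | some c => simp [checkchange, checkchange_alt]
  | cons p rest =>
    obtain ⟨u0, a0⟩ := p
    have hne : ((u0, a0) :: rest).length ≠ 0 := by simp
    -- A's components
    have hmax : PySem.List.max? (((u0, a0) :: rest).map (fun i => i.1)) (fun y => y)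
        = some (firstMax u0 a0 rest).1 := by
      rw [List.map_cons, PySem.List.max?_id_cons, fm_fst]
    obtain ⟨i, hidx, hget⟩ := key_idx rest u0 a0
    have hidx' : PySem.List.index? (((u0, a0) :: rest).map (fun i => i.1)) (firstMax u0 a0 rest).1 = some i := by
      simpa using hidx
    have hget' : PySem.List.pyGet? (((u0, a0) :: rest).map (fun i => i.2)) (Int.ofNat i)
        = some (firstMax u0 a0 rest).2 := by
      rw [show (Int.ofNat i) = ((i : Nat) : Int) from rfl, PySem.List.pyGet?_natCast]
      simpa using hget
    have hset : ((PySem.Set.ofList (a0 :: rest.map (fun i => i.2))).length = 1)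
        ↔ (rest.all (fun p => p.2 == a0) = true) := by
      rw [ofList_cons_len, setlen_one_iff, List.all_map]
      exact Iff.rfl
    simp only [checkchange, checkchange_alt, if_pos hne, hmax, hidx', Option.bind_some, hget',
      Option.getD_some, foldB_eq, Bool.true_and]
    cases currentinfo with
    | none => rfl
    | some c =>
      by_cases hall : rest.all (fun p => p.2 == a0) = true
      · have hlen := hset.mpr hall
        simp only [hall]
        by_cases h2 : (firstMax u0 a0 rest).2 = c.2 <;> simp [hlen, h2]
      · have hlen : ¬ (PySem.Set.ofList (a0 :: rest.map (fun i => i.2))).length = 1 :=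
          fun h => hall (hset.mp h)
        simp [hall, hlen]
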